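-- pv_equiv track=rewrite | github.com/ahmedfahad04/IIT-LAB | 4th Semester Labs/CSE 411_ Information Security/LAB/AES_CTR_FINAL.py | string_to_hex
-- ===== SOURCE A (Python) =====
-- def string_to_hex(s):
--     hex_string = ''   # temp hex string to store hex value as one single string
--     # for first char
--     h = hex(ord(s[0]))
--     hex_string += h
--
--     for i in range(1, len(s)):
--         h = hex(ord(s[i]))
--         hex_string += h[2:]
--
--     return int(hex_string,16)
-- ===== SOURCE B (Python) =====
-- def string_to_hex(s):
--     result = ord(s[0])
--     for i in range(1, len(s)):
--         c = ord(s[i])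
--         w = len(hex(c)) - 2
--         result = result * (16 ** w) + c
--     return result
-- ===== Notes on version B (the rewrite author's own statement) =====
-- stated objective: alternative
-- what changed: B accumulates the integer directly by positional arithmetic (result = result*16**width + ord(c)), eliminating A's hex-string concatenation and the terminal int(...,16) parse.
-- outside the precondition, e.g. on string_to_hex(''): A raises IndexError, B raises IndexError
import Mathlib
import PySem

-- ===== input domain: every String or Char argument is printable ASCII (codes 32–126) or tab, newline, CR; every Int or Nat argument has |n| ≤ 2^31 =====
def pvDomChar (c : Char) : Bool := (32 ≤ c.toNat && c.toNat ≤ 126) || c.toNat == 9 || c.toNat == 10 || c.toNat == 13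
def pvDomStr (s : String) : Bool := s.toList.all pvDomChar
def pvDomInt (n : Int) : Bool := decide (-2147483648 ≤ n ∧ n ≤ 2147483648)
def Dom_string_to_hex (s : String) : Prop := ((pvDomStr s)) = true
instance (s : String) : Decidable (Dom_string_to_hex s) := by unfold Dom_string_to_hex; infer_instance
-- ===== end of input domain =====

-- B replaces A's hex-string concatenation + int(...,16) parse by direct positional integer accumulation (alternative decomposition, same cost class).

-- ===== PORT A =====
-- one lowercase hex digit, as Python's hex() produces
def pyHexDigit (n : Nat) : Char := if n < 10 then Char.ofNat (48 + n) else Char.ofNat (87 + n)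

-- the digits of hex(n) after the "0x" prefix, for n ≥ 0 (exact for Python's hex on naturals)
def toHexDigits (n : Nat) : List Char :=
  if n < 16 then [pyHexDigit n]
  else toHexDigits (n / 16) ++ [pyHexDigit (n % 16)]
decreasing_by omega

-- hex(n) for n ≥ 0, including the "0x" prefix
def pyHex (n : Nat) : List Char := '0' :: 'x' :: toHexDigits n

-- value of one lowercase hex digit (exact on the digits hex() emits)
def hexVal (c : Char) : Int := if 97 ≤ c.toNat then (c.toNat : Int) - 87 else (c.toNat : Int) - 48

def parseHexDigits (cs : List Char) : Int := cs.foldl (fun a c => a * 16 + hexVal c) 0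

-- int(x, 16) for a nonnegative lowercase hex string with optional "0x" prefix (exact on A's hex_string)
def intBase16 (cs : List Char) : Int :=
  match cs with
  | '0' :: 'x' :: rest => parseHexDigits rest
  | _ => parseHexDigits cs

def string_to_hex (s : String) : Int :=
  match s.toList with
  | [] => 0   -- Python raises IndexError on s[0]; excluded by Pre_
  | c0 :: rest =>
    -- hex_string = hex(ord(s[0])); then for each later char append h[2:]
    let hexString := rest.foldl (fun acc c => acc ++ (pyHex c.toNat).drop 2) (pyHex c0.toNat)
    intBase16 hexString

-- ===== PORT B =====
def string_to_hex_alt (s : String) : Int :=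
  match s.toList with
  | [] => 0   -- Python raises IndexError on s[0]; excluded by Pre_
  | c0 :: rest =>
    rest.foldl (fun r c =>
      let w := (pyHex c.toNat).length - 2
      r * (16 : Int) ^ w + (c.toNat : Int)) (c0.toNat : Int)

-- ===== PRECONDITION & SPEC =====
-- Pre_ excludes only the empty string, on which both A and B raise IndexError at s[0].
def Pre_string_to_hex (s : String) : Prop := s ≠ ""
instance (s : String) : Decidable (Pre_string_to_hex s) := by unfold Pre_string_to_hex; infer_instance
def pvWitness_string_to_hex : String := "Ab"

def Spec_string_to_hex (s : String) (out : Int) : Prop := out = string_to_hex_alt s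
instance (s : String) (out : Int) : Decidable (Spec_string_to_hex s out) := by unfold Spec_string_to_hex; infer_instance

-- ===== CLAIM (what is proved, stated in full; the proofs are below) =====
def Claim_equal_string_to_hex : Prop := ∀ (s : String), Dom_string_to_hex s → Pre_string_to_hex s → Spec_string_to_hex s (string_to_hex s)

-- ===== LEMMAS AND PROOFS =====

theorem hexVal_pyHexDigit (d : Nat) (h : d < 16) : hexVal (pyHexDigit d) = d := by
  interval_cases d <;> decide

theorem toHexDigits_parse (n : Nat) : ∀ a : Int,
    (toHexDigits n).foldl (fun x c => x * 16 + hexVal c) a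
      = a * 16 ^ (toHexDigits n).length + n := by
  induction n using Nat.strong_induction_on with
  | _ n ih =>
    intro a
    rw [toHexDigits]
    split
    · next h =>
      simp [List.foldl, hexVal_pyHexDigit n h]
    · next h =>
      have hlt : n / 16 < n := by omega
      rw [List.foldl_append, ih _ hlt a]
      simp only [List.foldl, hexVal_pyHexDigit (n % 16) (by omega), List.length_append,
        List.length_cons, List.length_nil]
      have hn : (16 : Int) * (n / 16 : Nat) + (n % 16 : Nat) = (n : Nat) := by
        push_cast
        omega
      ring_nf
      push_cast
      ring_nf
      omega

-- parsing the concatenated chunks equals B's positional accumulation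
theorem flat_parse (l : List Char) : ∀ a : Int,
    (l.flatMap (fun c => toHexDigits c.toNat)).foldl (fun x c => x * 16 + hexVal c) a
      = l.foldl (fun r c => r * (16 : Int) ^ (toHexDigits c.toNat).length + (c.toNat : Int)) a := by
  induction l with
  | nil => intro a; rfl
  | cons c l ihl =>
    intro a
    rw [List.flatMap_cons, List.foldl_append, toHexDigits_parse, ihl]
    simp [List.foldl]

-- ===== VERDICT (by name: the statement is the Claim_ definition above) =====
theorem string_to_hex_spec : Claim_equal_string_to_hex := by
  intro s _ _
  unfold Spec_string_to_hex string_to_hex string_to_hex_alt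
  cases hs : s.toList with
  | nil => rfl
  | cons c0 rest =>
    simp only [PySem.List.foldl_append_eq_flatMap, pyHex, List.drop_succ_cons, List.drop_zero]
    show intBase16 ('0' :: 'x' :: (toHexDigits c0.toNat ++ _)) = _
    unfold intBase16
    simp only [parseHexDigits, List.foldl_append, toHexDigits_parse, flat_parse]
    simp only [List.length_cons]
    have hf : (fun (r : Int) (c : Char) => r * (16:Int) ^ ((toHexDigits c.toNat).length + 1 + 1 - 2) + (c.toNat : Int))
        = fun (r : Int) (c : Char) => r * (16:Int) ^ (toHexDigits c.toNat).length + (c.toNat : Int) := by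
      funext r c
      have h2 : (toHexDigits c.toNat).length + 1 + 1 - 2 = (toHexDigits c.toNat).length := by omega
      rw [h2]
    rw [hf]
    norm_num
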